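-- pv_equiv track=rewrite | github.com/tyctor/codeadvent2023 | day11/part2.py | get_expanded
-- ===== SOURCE A (Python) =====
-- EXPAND_BY = 1000000
--
-- def get_expanded(row_from, row_to, rows_to_expand, col_from, col_to, cols_to_expand):
--     if row_from > row_to:
--         row_from, row_to = row_to, row_from
--     if col_from > col_to:
--         col_from, col_to = col_to, col_from
--     expanded_rows = []
--     for row in rows_to_expand:
--         if row_from < row < row_to:
--             expanded_rows.append(row)
--     expanded_cols = []
--     for col in cols_to_expand:
--         if col_from < col < col_to:
--             expanded_cols.append(col)
--     return row_to + ((EXPAND_BY - 1) * len(expanded_rows)) - row_from + col_to + ((EXPAND_BY - 1) * len(expanded_cols)) - col_from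
-- ===== SOURCE B (Python) =====
-- EXPAND_BY = 1000000
--
--
-- def _bisect_left(s, x):
--     # standard bisect_left (A's module imports nothing, so written out here)
--     lo, hi = 0, len(s)
--     while lo < hi:
--         mid = (lo + hi) // 2
--         if s[mid] < x:
--             lo = mid + 1
--         else:
--             hi = mid
--     return lo
--
--
-- def _count_strict_between(values, low, high):
--     s = sorted(values)
--     j = _bisect_left(s, high)      # elements < high
--     i = _bisect_left(s, low + 1)   # elements <= low
--     return max(j - i, 0)
--
--
-- def get_expanded(row_from, row_to, rows_to_expand, col_from, col_to, cols_to_expand):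
--     lo_r, hi_r = min(row_from, row_to), max(row_from, row_to)
--     lo_c, hi_c = min(col_from, col_to), max(col_from, col_to)
--     nr = _count_strict_between(rows_to_expand, lo_r, hi_r)
--     nc = _count_strict_between(cols_to_expand, lo_c, hi_c)
--     return (hi_r - lo_r) + (hi_c - lo_c) + (EXPAND_BY - 1) * (nr + nc)
-- ===== Notes on version B (the rewrite author's own statement) =====
-- stated objective: alternative
-- what changed: Replaces A's two linear filter loops that materialise lists of in-range coordinates with sort plus two binary searches (bisect_left) per axis, counting in-range entries as a difference of insertion points; trades the linear scan for sorting, so it is not faster per call.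
import Mathlib
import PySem

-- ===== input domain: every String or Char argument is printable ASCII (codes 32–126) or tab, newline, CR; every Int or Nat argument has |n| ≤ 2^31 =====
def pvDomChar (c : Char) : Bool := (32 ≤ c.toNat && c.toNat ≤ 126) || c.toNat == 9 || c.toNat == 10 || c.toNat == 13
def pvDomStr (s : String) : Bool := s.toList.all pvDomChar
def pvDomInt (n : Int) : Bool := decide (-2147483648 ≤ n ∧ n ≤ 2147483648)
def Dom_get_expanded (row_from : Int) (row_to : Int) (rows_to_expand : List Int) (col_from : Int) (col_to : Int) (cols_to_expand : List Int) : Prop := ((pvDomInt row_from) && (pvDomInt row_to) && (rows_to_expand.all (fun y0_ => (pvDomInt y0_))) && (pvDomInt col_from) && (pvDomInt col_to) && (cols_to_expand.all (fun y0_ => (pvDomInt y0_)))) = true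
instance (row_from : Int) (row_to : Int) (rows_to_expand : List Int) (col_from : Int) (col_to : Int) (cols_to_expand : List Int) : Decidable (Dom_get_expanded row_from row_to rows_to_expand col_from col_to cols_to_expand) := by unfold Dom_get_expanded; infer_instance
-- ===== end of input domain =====

-- B replaces A's two linear filter loops with sort + two binary searches per axis (same result, different algorithm; not measured faster).

-- ===== PORT A =====
-- literal transliteration of A: normalise by swapping, append in-range elements, arithmetic on lengths
def get_expanded (row_from : Int) (row_to : Int) (rows_to_expand : List Int) (col_from : Int) (col_to : Int) (cols_to_expand : List Int) : Int :=
  let rp := if row_from > row_to then (row_to, row_from) else (row_from, row_to)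
  let cp := if col_from > col_to then (col_to, col_from) else (col_from, col_to)
  let expanded_rows : List Int :=
    rows_to_expand.foldl (fun acc row => if rp.1 < row ∧ row < rp.2 then acc ++ [row] else acc) []
  let expanded_cols : List Int :=
    cols_to_expand.foldl (fun acc col => if cp.1 < col ∧ col < cp.2 then acc ++ [col] else acc) []
  rp.2 + ((1000000 - 1) * (expanded_rows.length : Int)) - rp.1
    + cp.2 + ((1000000 - 1) * (expanded_cols.length : Int)) - cp.1

-- ===== PORT B =====
-- Source B's _bisect_left is the standard bisect_left while-loop; its PySem primitive is PySem.List.bisectLeft.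
def countStrictBetween (values : List Int) (low high : Int) : Int :=
  let s := PySem.List.sorted values (fun x => x)
  let j := PySem.List.bisectLeft s high        -- elements < high
  let i := PySem.List.bisectLeft s (low + 1)   -- elements <= low
  max ((j : Int) - (i : Int)) 0

def get_expanded_alt (row_from : Int) (row_to : Int) (rows_to_expand : List Int) (col_from : Int) (col_to : Int) (cols_to_expand : List Int) : Int :=
  let lo_r := min row_from row_to
  let hi_r := max row_from row_to
  let lo_c := min col_from col_to
  let hi_c := max col_from col_to
  let nr := countStrictBetween rows_to_expand lo_r hi_r
  let nc := countStrictBetween cols_to_expand lo_c hi_c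
  (hi_r - lo_r) + (hi_c - lo_c) + (1000000 - 1) * (nr + nc)

-- ===== PRECONDITION & SPEC =====
def Spec_get_expanded (row_from : Int) (row_to : Int) (rows_to_expand : List Int) (col_from : Int) (col_to : Int) (cols_to_expand : List Int) (out : Int) : Prop := out = get_expanded_alt row_from row_to rows_to_expand col_from col_to cols_to_expand
instance (row_from : Int) (row_to : Int) (rows_to_expand : List Int) (col_from : Int) (col_to : Int) (cols_to_expand : List Int) (out : Int) : Decidable (Spec_get_expanded row_from row_to rows_to_expand col_from col_to cols_to_expand out) := by unfold Spec_get_expanded; infer_instance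

-- ===== CLAIM (what is proved, stated in full; the proofs are below) =====
def Claim_equal_get_expanded : Prop := ∀ (row_from : Int) (row_to : Int) (rows_to_expand : List Int) (col_from : Int) (col_to : Int) (cols_to_expand : List Int), Dom_get_expanded row_from row_to rows_to_expand col_from col_to cols_to_expand → Spec_get_expanded row_from row_to rows_to_expand col_from col_to cols_to_expand (get_expanded row_from row_to rows_to_expand col_from col_to cols_to_expand)

-- ===== LEMMAS AND PROOFS =====

-- countP of a predicate that holds exactly on the first k indices is k
theorem countP_of_boundary (s : List Int) (p : Int → Bool) (k : Nat) (hk : k ≤ s.length)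
    (h : ∀ j (hj : j < s.length), p s[j] = true ↔ j < k) : s.countP p = k := by
  have hsplit : s = s.take k ++ s.drop k := (List.take_append_drop k s).symm
  have h1 : (s.take k).countP p = k := by
    have hall : ∀ a ∈ s.take k, p a = true := by
      intro a ha
      rcases List.mem_iff_getElem.mp ha with ⟨i, hi, rfl⟩
      have hik : i < k := by simp [List.length_take] at hi; omega
      have : (s.take k)[i] = s[i]'(lt_of_lt_of_le hik hk) := List.getElem_take
      rw [this]
      exact (h i _).mpr hik
    calc (s.take k).countP p = (s.take k).length := List.countP_eq_length.mpr hall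
      _ = k := by simp [List.length_take]; omega
  have h2 : (s.drop k).countP p = 0 := by
    apply List.countP_eq_zero.mpr
    intro a ha
    rcases List.mem_iff_getElem.mp ha with ⟨i, hi, rfl⟩
    have hlen : k + i < s.length := by
      have := hi; simp [List.length_drop] at this; omega
    have : (s.drop k)[i] = s[k + i]'hlen := List.getElem_drop
    rw [this]
    intro hp
    have := (h (k + i) hlen).mp hp
    omega
  conv_lhs => rw [hsplit]
  rw [List.countP_append, h1, h2]
  omega


-- bisect_left on a sorted list counts the elements < x
theorem bisectLeft_eq_countP (s : List Int) (x : Int) (hs : s.Pairwise (· ≤ ·)) :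
    PySem.List.bisectLeft s x = s.countP (fun y => decide (y < x)) := by
  obtain ⟨hle, hlt, hge⟩ := PySem.List.bisectLeft_spec s x hs
  symm
  apply countP_of_boundary s _ _ hle
  intro j hj
  constructor
  · intro hp
    by_contra hnot
    have := hge j hj (by omega)
    simp at hp
    omega
  · intro hjk
    simp
    exact hlt j hj hjk

-- for low < high, {y < high} splits into {low < y < high} and {y ≤ low}
theorem countP_split (values : List Int) (low high : Int) (hlh : low < high) :
    values.countP (fun y => decide (y < high))
      = values.countP (fun y => decide (low < y ∧ y < high))
        + values.countP (fun y => decide (y < low + 1)) := by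
  induction values with
  | nil => simp
  | cons a t ih =>
    simp only [List.countP_cons, ih, decide_eq_true_eq]
    split_ifs <;> omega

-- the difference of the two insertion points is the strict-between count
theorem countStrictBetween_eq_countP (values : List Int) (low high : Int) :
    countStrictBetween values low high
      = (values.countP (fun y => decide (low < y ∧ y < high)) : Int) := by
  show max ((PySem.List.bisectLeft (PySem.List.sorted values (fun x => x)) high : Int) - (PySem.List.bisectLeft (PySem.List.sorted values (fun x => x)) (low+1) : Int)) 0 = _
  have hs := PySem.List.sorted_pairwise values (fun x => x)
  simp only at hs
  rw [bisectLeft_eq_countP _ high hs, bisectLeft_eq_countP _ (low + 1) hs]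
  have hperm := PySem.List.sorted_perm values (fun x => x) false
  rw [hperm.countP_eq, hperm.countP_eq]
  by_cases hlh : low < high
  · rw [countP_split values low high hlh]
    omega
  · -- empty interval: both the count and the truncated difference are 0
    have h0 : values.countP (fun y => decide (low < y ∧ y < high)) = 0 := by
      apply List.countP_eq_zero.mpr
      intro a _
      simp; omega
    have hmono : values.countP (fun y => decide (y < high))
        ≤ values.countP (fun y => decide (y < low + 1)) := by
      apply List.countP_mono_left
      intro a _ h
      simp at h ⊢; omega
    rw [h0]
    omega

-- ===== VERDICT (by name: the statement is the Claim_ definition above) =====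
theorem get_expanded_spec : Claim_equal_get_expanded := by
  intro row_from row_to rows_to_expand col_from col_to cols_to_expand _
  unfold Spec_get_expanded get_expanded get_expanded_alt
  simp only [PySem.List.foldl_append_ite_eq_filter, List.nil_append]
  rw [countStrictBetween_eq_countP, countStrictBetween_eq_countP]
  rw [← List.countP_eq_length_filter, ← List.countP_eq_length_filter]
  have hr : (if row_from > row_to then (row_to, row_from) else (row_from, row_to))
      = (min row_from row_to, max row_from row_to) := by
    split_ifs with h <;> simp [min_def, max_def] <;> omega
  have hc : (if col_from > col_to then (col_to, col_from) else (col_from, col_to))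
      = (min col_from col_to, max col_from col_to) := by
    split_ifs with h <;> simp [min_def, max_def] <;> omega
  rw [hr, hc]
  ring
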